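-- pv_equiv track=rewrite | github.com/greatbritdan/AidanBot | functions.py | getIntFromText
-- ===== SOURCE A (Python) =====
-- thelist = {
-- 	"1": "1", "2": "2", "3": "3", "4": "4", "5": "5", "6": "6",
-- 	"7": "7", "8": "8", "9": "9", "0": "0", "a": "11", "b": "12",
-- 	"c": "13", "d": "14", "e": "15", "f": "16", "g": "17", "h": "18",
-- 	"i": "19", "j": "20", "k": "21", "l": "22", "m": "23", "n": "24",
-- 	"o": "25", "p": "26", "q": "27", "r": "28", "s": "29", "t": "30",
-- 	"u": "31", "v": "32", "w": "33", "x": "34", "y": "35", "z": "36",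
-- 	" ": "37", ".": "38", ",": "39", ":": "40", ";": "41", "'": "42",
-- 	"/": "43", "-": "44", "+": "45"
-- }
--
-- def getIntFromText(txt):
-- 	sed = ""
-- 	for letter in txt:
-- 		if letter in thelist:
-- 			sed = sed + thelist[letter]
-- 		else:
-- 			sed = sed + "46"
--
-- 	return (int(sed))
-- ===== SOURCE B (Python) =====
-- _PUNCT = " .,:;'/-+"
--
-- def getIntFromText(txt):
-- 	acc = 0
-- 	for ch in txt:
-- 		if '0' <= ch <= '9':
-- 			acc = acc * 10 + (ord(ch) - 48)
-- 		else:
-- 			if 'a' <= ch <= 'z':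
-- 				v = ord(ch) - 86  # 'a' -> 11 ... 'z' -> 36
-- 			else:
-- 				i = _PUNCT.find(ch)
-- 				v = 37 + i if i >= 0 else 46
-- 			acc = acc * 100 + v
-- 	return acc
-- ===== Notes on version B (the rewrite author's own statement) =====
-- stated objective: alternative
-- what changed: B drops the code table and the string concatenation entirely: it classifies each character arithmetically by range (digit / lowercase / a 9-char punctuation string searched with find) and builds the result by positional integer arithmetic acc = acc*shift + value instead of concatenating digit strings and parsing with int().
-- outside the precondition, e.g. on getIntFromText(''): A raises ValueError, B returns 0
-- crash fix: On the empty string A raises ValueError (int('') on the empty concatenation) while B returns 0. — e.g. on getIntFromText(""): A raises ValueError, B returns 0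
import Mathlib
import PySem

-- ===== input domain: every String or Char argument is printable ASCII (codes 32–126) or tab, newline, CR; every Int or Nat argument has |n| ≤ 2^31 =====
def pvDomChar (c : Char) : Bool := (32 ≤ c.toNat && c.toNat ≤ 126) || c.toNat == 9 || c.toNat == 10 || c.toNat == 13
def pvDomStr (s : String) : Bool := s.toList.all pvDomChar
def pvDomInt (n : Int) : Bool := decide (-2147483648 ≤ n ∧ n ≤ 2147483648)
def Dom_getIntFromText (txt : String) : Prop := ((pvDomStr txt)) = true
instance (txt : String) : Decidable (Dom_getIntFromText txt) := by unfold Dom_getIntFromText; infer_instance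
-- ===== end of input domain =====

-- B replaces A's table-driven build-a-digit-string-then-int() scheme by direct positional
-- integer arithmetic with the per-char code computed from character ranges (objective: alternative).

-- ===== PORT A =====
-- the module-level dict 'thelist' (char keys, digit-string values)
def thelistA : PySem.Dict Char (List Char) := PySem.Dict.mk [
  ('1', ['1']), ('2', ['2']), ('3', ['3']), ('4', ['4']), ('5', ['5']), ('6', ['6']),
  ('7', ['7']), ('8', ['8']), ('9', ['9']), ('0', ['0']), ('a', ['1','1']), ('b', ['1','2']),
  ('c', ['1','3']), ('d', ['1','4']), ('e', ['1','5']), ('f', ['1','6']), ('g', ['1','7']), ('h', ['1','8']),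
  ('i', ['1','9']), ('j', ['2','0']), ('k', ['2','1']), ('l', ['2','2']), ('m', ['2','3']), ('n', ['2','4']),
  ('o', ['2','5']), ('p', ['2','6']), ('q', ['2','7']), ('r', ['2','8']), ('s', ['2','9']), ('t', ['3','0']),
  ('u', ['3','1']), ('v', ['3','2']), ('w', ['3','3']), ('x', ['3','4']), ('y', ['3','5']), ('z', ['3','6']),
  (' ', ['3','7']), ('.', ['3','8']), (',', ['3','9']), (':', ['4','0']), (';', ['4','1']), ('\'', ['4','2']),
  ('/', ['4','3']), ('-', ['4','4']), ('+', ['4','5'])]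

-- hand port of int(s), exact for the strings A applies it to: sed consists only of the
-- digit chars '0'-'9' (every code in thelist and the default "46" are digit strings), and
-- int() on a pure digit string raises ValueError (here: none) iff it is empty, else
-- returns its decimal value.  (PySem.Int.ofStr? computes the same values, but its digit
-- parser is a private definition, leaving no way to reason about it on unbounded strings.)
def pyIntDigits? (l : List Char) : Option Int :=
  if l = [] then none
  else some (l.foldl (fun a c => a * 10 + ((c.toNat : Int) - 48)) 0)

def getIntFromText (txt : String) : Int :=
  let sed : List Char := txt.toList.foldl (fun sed letter =>
    match PySem.Dict.get? thelistA letter with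
    | some code => sed ++ code
    | none => sed ++ ['4', '6']) []
  (pyIntDigits? sed).getD 0    -- int(sed); the `.getD 0` is unreachable under Pre_ (sed nonempty)

-- ===== PORT B =====
-- the module-level string _PUNCT = " .,:;'/-+"
def punctB : List Char := [' ', '.', ',', ':', ';', '\'', '/', '-', '+']

def getIntFromText_alt (txt : String) : Int :=
  txt.toList.foldl (fun acc ch =>
    if '0' ≤ ch ∧ ch ≤ '9' then
      acc * 10 + ((ch.toNat : Int) - 48)       -- ord(ch) - 48
    else
      let v : Int :=
        if 'a' ≤ ch ∧ ch ≤ 'z' then (ch.toNat : Int) - 86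
        else
          let i : Int := PySem.Chars.find punctB [ch]   -- _PUNCT.find(ch)
          if 0 ≤ i then 37 + i else 46
      acc * 100 + v) 0

-- ===== PRECONDITION & SPEC =====
-- Pre_ excludes only the empty string, on which A raises ValueError (int('')).
def Pre_getIntFromText (txt : String) : Prop := txt ≠ ""
instance (txt : String) : Decidable (Pre_getIntFromText txt) := by unfold Pre_getIntFromText; infer_instance
def pvWitness_getIntFromText : String := "a z+"

-- On the empty string A raises ValueError (int('') on the empty code string) while B returns 0.
def Raises_getIntFromText (txt : String) : Prop := txt = ""
instance (txt : String) : Decidable (Raises_getIntFromText txt) := by unfold Raises_getIntFromText; infer_instance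
def pvRaiseWitness_getIntFromText : String := ""
def pvRaiseWitnessOut_getIntFromText : Int := 0

def Spec_getIntFromText (txt : String) (out : Int) : Prop := out = getIntFromText_alt txt
instance (txt : String) (out : Int) : Decidable (Spec_getIntFromText txt out) := by unfold Spec_getIntFromText; infer_instance

-- ===== CLAIM (what is proved, stated in full; the proofs are below) =====
def Claim_equal_getIntFromText : Prop := ∀ (txt : String), Dom_getIntFromText txt → Pre_getIntFromText txt → Spec_getIntFromText txt (getIntFromText txt)
def Claim_raises_getIntFromText : Prop := (∀ (txt : String), Dom_getIntFromText txt → Raises_getIntFromText txt → ¬ Pre_getIntFromText txt) ∧ (Dom_getIntFromText (pvRaiseWitness_getIntFromText) ∧ Raises_getIntFromText (pvRaiseWitness_getIntFromText) ∧ getIntFromText_alt (pvRaiseWitness_getIntFromText) = pvRaiseWitnessOut_getIntFromText)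

-- ===== LEMMAS AND PROOFS =====

-- the code chunk A's loop body appends for one char
def codeOf (c : Char) : List Char :=
  match PySem.Dict.get? thelistA c with
  | some code => code
  | none => ['4', '6']

-- decimal value of a digit string, as pyIntDigits? computes it
def valD (l : List Char) : Int := l.foldl (fun a c => a * 10 + ((c.toNat : Int) - 48)) 0

-- B's per-char contribution, as a (value, positional shift) pair
def stepPair (c : Char) : Int × Int :=
  if '0' ≤ c ∧ c ≤ '9' then ((c.toNat : Int) - 48, 10)
  else
    ((if 'a' ≤ c ∧ c ≤ 'z' then (c.toNat : Int) - 86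
      else
        let i : Int := PySem.Chars.find punctB [c]
        if 0 ≤ i then 37 + i else 46), 100)

theorem astep_eq (sed : List Char) (c : Char) :
    (match PySem.Dict.get? thelistA c with
     | some code => sed ++ code
     | none => sed ++ ['4', '6']) = sed ++ codeOf c := by
  unfold codeOf; cases PySem.Dict.get? thelistA c <;> rfl

theorem bstep_eq (acc : Int) (c : Char) :
    (if '0' ≤ c ∧ c ≤ '9' then
      acc * 10 + ((c.toNat : Int) - 48)
    else
      let v : Int :=
        if 'a' ≤ c ∧ c ≤ 'z' then (c.toNat : Int) - 86
        else
          let i : Int := PySem.Chars.find punctB [c]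
          if 0 ≤ i then 37 + i else 46
      acc * 100 + v) = acc * (stepPair c).2 + (stepPair c).1 := by
  unfold stepPair
  by_cases h : '0' ≤ c ∧ c ≤ '9' <;> simp [h]

-- the heart of the equivalence: B's arithmetic classification of a char agrees,
-- value and width, with A's table entry
set_option maxRecDepth 8192 in
set_option maxHeartbeats 1600000 in
theorem pair_fact (c : Char) :
    stepPair c = (valD (codeOf c), (10 : Int) ^ (codeOf c).length) := by
  have hc : c = Char.ofNat c.toNat := (Char.ofNat_toNat c).symm
  by_cases hd : '0' ≤ c ∧ c ≤ '9'
  · have h1 : 48 ≤ c.toNat := by have := hd.1; simpa [Char.le_def] using this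
    have h2 : c.toNat ≤ 57 := by have := hd.2; simpa [Char.le_def] using this
    interval_cases h : c.toNat <;> (subst hc; decide)
  · by_cases hl : 'a' ≤ c ∧ c ≤ 'z'
    · have h1 : 97 ≤ c.toNat := by have := hl.1; simpa [Char.le_def] using this
      have h2 : c.toNat ≤ 122 := by have := hl.2; simpa [Char.le_def] using this
      interval_cases h : c.toNat <;> (subst hc; decide)
    · by_cases hp : c ∈ punctB
      · simp only [punctB, List.mem_cons, List.not_mem_nil, or_false] at hp
        rcases hp with rfl | rfl | rfl | rfl | rfl | rfl | rfl | rfl | rfl <;> decide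
      · -- unknown character: B's find misses, A's table lookup misses
        have hfind : PySem.Chars.find punctB [c] = -1 := by
          rw [PySem.Chars.find_eq_neg_one_iff]
          exact fun hinf => hp (hinf.mem (List.mem_singleton_self c))
        have hnone : PySem.Dict.get? thelistA c = none := by
          rw [PySem.Dict.get?_eq_none_iff_not_mem_keys]
          intro hmem
          unfold thelistA at hmem
          rw [PySem.Dict.keys_mk] at hmem
          simp only [List.map_cons, List.map_nil, List.mem_cons, List.not_mem_nil, or_false] at hmem
          rcases hmem with rfl | rfl | rfl | rfl | rfl | rfl | rfl | rfl | rfl | rfl |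
            rfl | rfl | rfl | rfl | rfl | rfl | rfl | rfl | rfl | rfl | rfl | rfl | rfl |
            rfl | rfl | rfl | rfl | rfl | rfl | rfl | rfl | rfl | rfl | rfl | rfl | rfl |
            rfl | rfl | rfl | rfl | rfl | rfl | rfl | rfl | rfl
          all_goals first
            | exact absurd ⟨by decide, by decide⟩ hd
            | exact absurd ⟨by decide, by decide⟩ hl
            | exact absurd (by decide) hp
        unfold stepPair codeOf
        rw [hnone, if_neg hd, if_neg hl]
        simp [hfind, valD]

theorem valD_foldl (t : List Char) : ∀ a : Int,
    t.foldl (fun a c => a * 10 + ((c.toNat : Int) - 48)) a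
      = a * (10 : Int) ^ t.length + valD t := by
  induction t with
  | nil => intro a; simp [valD]
  | cons c t ih =>
    intro a
    simp only [List.foldl_cons, List.length_cons]
    have h2 : valD (c :: t) = ((0 : Int) * 10 + ((c.toNat : Int) - 48)) * (10 : Int) ^ t.length + valD t := by
      unfold valD
      simp only [List.foldl_cons]
      exact ih _
    rw [ih, h2, pow_succ]
    ring

theorem valD_append (s t : List Char) :
    valD (s ++ t) = valD s * (10 : Int) ^ t.length + valD t := by
  unfold valD
  rw [List.foldl_append]
  exact valD_foldl t _

theorem codeOf_ne_nil (c : Char) : codeOf c ≠ [] := by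
  unfold codeOf
  cases h : PySem.Dict.get? thelistA c with
  | none => decide
  | some v =>
    have hm := PySem.Dict.mem_items_of_get?_eq_some thelistA h
    unfold thelistA at hm
    simp only [List.mem_cons, List.not_mem_nil, or_false, Prod.mk.injEq] at hm
    rcases hm with ⟨_, rfl⟩ | ⟨_, rfl⟩ | ⟨_, rfl⟩ | ⟨_, rfl⟩ | ⟨_, rfl⟩ | ⟨_, rfl⟩ | ⟨_, rfl⟩ |
      ⟨_, rfl⟩ | ⟨_, rfl⟩ | ⟨_, rfl⟩ | ⟨_, rfl⟩ | ⟨_, rfl⟩ | ⟨_, rfl⟩ | ⟨_, rfl⟩ | ⟨_, rfl⟩ |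
      ⟨_, rfl⟩ | ⟨_, rfl⟩ | ⟨_, rfl⟩ | ⟨_, rfl⟩ | ⟨_, rfl⟩ | ⟨_, rfl⟩ | ⟨_, rfl⟩ | ⟨_, rfl⟩ |
      ⟨_, rfl⟩ | ⟨_, rfl⟩ | ⟨_, rfl⟩ | ⟨_, rfl⟩ | ⟨_, rfl⟩ | ⟨_, rfl⟩ | ⟨_, rfl⟩ | ⟨_, rfl⟩ |
      ⟨_, rfl⟩ | ⟨_, rfl⟩ | ⟨_, rfl⟩ | ⟨_, rfl⟩ | ⟨_, rfl⟩ | ⟨_, rfl⟩ | ⟨_, rfl⟩ | ⟨_, rfl⟩ |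
      ⟨_, rfl⟩ | ⟨_, rfl⟩ | ⟨_, rfl⟩ | ⟨_, rfl⟩ | ⟨_, rfl⟩ | ⟨_, rfl⟩ <;> decide

theorem bfold_eq (l : List Char) : ∀ acc : Int,
    l.foldl (fun acc ch =>
      if '0' ≤ ch ∧ ch ≤ '9' then
        acc * 10 + ((ch.toNat : Int) - 48)
      else
        let v : Int :=
          if 'a' ≤ ch ∧ ch ≤ 'z' then (ch.toNat : Int) - 86
          else
            let i : Int := PySem.Chars.find punctB [ch]
            if 0 ≤ i then 37 + i else 46
        acc * 100 + v) acc
      = acc * (10 : Int) ^ (l.flatMap codeOf).length + valD (l.flatMap codeOf) := by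
  induction l with
  | nil => intro acc; simp [valD]
  | cons c l ih =>
    intro acc
    simp only [List.foldl_cons, List.flatMap_cons]
    rw [bstep_eq, ih, pair_fact, List.length_append, valD_append, pow_add]
    dsimp only
    ring

theorem flatMap_ne_nil (c : Char) (l : List Char) : (c :: l).flatMap codeOf ≠ [] := by
  simp only [List.flatMap_cons, ne_eq, List.append_eq_nil_iff, not_and]
  intro h
  exact absurd h (codeOf_ne_nil c)

theorem afold (l : List Char) : ∀ s : List Char,
    l.foldl (fun sed letter =>
      match PySem.Dict.get? thelistA letter with
      | some code => sed ++ code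
      | none => sed ++ ['4', '6']) s = s ++ l.flatMap codeOf := by
  induction l with
  | nil => intro s; simp
  | cons c l ih =>
    intro s
    simp only [List.foldl_cons, List.flatMap_cons]
    rw [astep_eq, ih, List.append_assoc]

-- ===== VERDICT (by name: the statement is the Claim_ definition above) =====
theorem getIntFromText_spec : Claim_equal_getIntFromText := by
  intro txt _ hpre
  unfold Spec_getIntFromText getIntFromText getIntFromText_alt
  dsimp only
  rw [afold, List.nil_append]
  have hne : txt.toList ≠ [] := fun h => hpre (String.toList_eq_nil_iff.mp h)
  obtain ⟨c, l, hcl⟩ := List.exists_cons_of_ne_nil hne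
  rw [hcl, bfold_eq]
  have hsome : pyIntDigits? ((c :: l).flatMap codeOf) = some (valD ((c :: l).flatMap codeOf)) := by
    unfold pyIntDigits? valD
    rw [if_neg (flatMap_ne_nil c l)]
  rw [hsome]
  simp only [Option.getD_some]
  ring

theorem getIntFromText_raises : Claim_raises_getIntFromText := by
  unfold Claim_raises_getIntFromText
  exact ⟨fun txt _ hr => by simp [Raises_getIntFromText] at hr; simp [Pre_getIntFromText, hr], by decide⟩

-- self-check: the raise witness does lie inside Raises_
theorem getIntFromText_raises_witness_ok : Raises_getIntFromText pvRaiseWitness_getIntFromText := getIntFromText_raises.2.2.1
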